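-- pv_equiv track=rewrite | github.com/justinbourb/coding_challenges | code_challenges_python/codility_MSK_find_longest_balanced_string.py | solution
-- ===== SOURCE A (Python) =====
-- def solution(S):
-- 	"""
-- 	Given a string, find the longest balanced section of the string.
-- 	Requirements:
-- 	    1) upper and lower case version of the letter must be present
-- 	    2) no other characters can break the substring
-- 	    Example:
-- 			Input: 'azABaabza'  Returns: 5 from substring 'ABaab'
--
-- 	My solution is missing a way to track the longest balanced fragment.
-- 	Currently is checks if both upper and lower case characters are in the string.
-- 	TODO: check for longest balanced fragment
-- 	    1) track letters found. lower or uppercase okay. if letter match not found, it's a break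
--
-- 	Running in O(N) time and space complexity.
-- 	:param S:
-- 	:return:
-- 	"""
-- 	# key = letter: [0 = upper case present, 1 = lower case present]
-- 	answer_map = {
-- 	}
-- 	balanced = 0
-- 	# create the map
-- 	for i in S:
-- 		key = i.lower()
-- 		if key in answer_map:
-- 			continue
-- 		else:
-- 			answer_map[key] = [False,False]
-- 	# fill in the map
-- 	for i in S:
-- 		key = i.lower()
-- 		if i.islower():
-- 			# 0 is upper
-- 			# 1 is lower
-- 			answer_map[key][1] = True
-- 		else:
-- 			answer_map[key][0] = True
-- 	# check for both
-- 	for key in answer_map: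
-- 		# if lower and upper case have been toggled true, continue checking
-- 		if answer_map[key][0] == True and answer_map[key][1] == True:
-- 				balanced += 1
-- 	if balanced > 0:
-- 		return balanced
-- 	else:
-- 		return -1
-- ===== SOURCE B (Python) =====
-- def solution(S):
--     balanced = 0
--     for k in {c.lower() for c in S}:
--         if any(c.islower() and c.lower() == k for c in S) and \
--            any(not c.islower() and c.lower() == k for c in S):
--             balanced += 1
--     return balanced if balanced > 0 else -1
-- ===== Notes on version B (the rewrite author's own statement) =====
-- stated objective: alternative
-- what changed: Drops A's marking structure (the dict of [upper,lower] flags filled by three staged loops) entirely: B loops over the set of distinct lowered characters and, for each candidate key, rescans the string with two any() passes to test whether both cases occur, trading A's precomputed index for per-key brute-force scans.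
import Mathlib
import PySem

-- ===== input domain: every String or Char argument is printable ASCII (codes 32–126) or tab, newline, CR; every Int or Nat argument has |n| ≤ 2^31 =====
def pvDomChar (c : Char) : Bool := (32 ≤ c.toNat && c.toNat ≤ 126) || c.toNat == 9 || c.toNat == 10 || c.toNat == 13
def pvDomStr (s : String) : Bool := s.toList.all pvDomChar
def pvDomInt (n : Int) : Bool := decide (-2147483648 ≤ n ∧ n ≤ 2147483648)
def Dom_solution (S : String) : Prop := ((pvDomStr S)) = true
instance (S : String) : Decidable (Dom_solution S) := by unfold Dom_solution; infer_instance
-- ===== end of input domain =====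

-- B drops A's marking structure (dict of [upper,lower] flags, three loops): it loops over the
-- distinct lowered characters and rescans the string per key with two any-passes (objective: alternative).

-- ===== PORT A =====
-- loop body of A's first loop ("create the map")
def pvCreate (d : PySem.Dict Char (Bool × Bool)) (i : Char) : PySem.Dict Char (Bool × Bool) :=
  let key := PySem.Chars.lowerChar i
  if d.contains key then d else d.insert key (false, false)

-- loop body of A's second loop ("fill in the map"); the key is always present
-- (created by the first loop over the same string), so modify's default is never used
def pvFill (d : PySem.Dict Char (Bool × Bool)) (i : Char) : PySem.Dict Char (Bool × Bool) :=
  let key := PySem.Chars.lowerChar i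
  if PySem.Chars.islower i then d.modify key (false, false) (fun p => (p.1, true))
  else d.modify key (false, false) (fun p => (true, p.2))

def solution (S : String) : Int :=
  let l := S.toList
  let answer_map := l.foldl pvCreate PySem.Dict.empty
  let answer_map := l.foldl pvFill answer_map
  -- "for key in answer_map": answer_map[key] is total here (every key is in the dict), ported as getD
  let balanced : Int :=
    answer_map.keys.foldl (fun b k =>
      let v := answer_map.getD k (false, false)
      if v.1 && v.2 then b + 1 else b) 0
  if balanced > 0 then balanced else -1

-- ===== PORT B =====
-- the count does not depend on the iteration order of the Python set, so folding over
-- PySem.Set.ofList (first-occurrence order) is exact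
def solution_alt (S : String) : Int :=
  let l := S.toList
  let keys : PySem.Set Char := PySem.Set.ofList (l.map PySem.Chars.lowerChar)
  let balanced : Int := keys.foldl (fun b k =>
    if l.any (fun c => PySem.Chars.islower c && (PySem.Chars.lowerChar c == k)) &&
       l.any (fun c => !PySem.Chars.islower c && (PySem.Chars.lowerChar c == k))
    then b + 1 else b) 0
  if balanced > 0 then balanced else -1

-- ===== PRECONDITION & SPEC =====
def Spec_solution (S : String) (out : Int) : Prop := out = solution_alt S
instance (S : String) (out : Int) : Decidable (Spec_solution S out) := by unfold Spec_solution; infer_instance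

-- ===== CLAIM (what is proved, stated in full; the proofs are below) =====
def Claim_equal_solution : Prop := ∀ (S : String), Dom_solution S → Spec_solution S (solution S)

-- ===== LEMMAS AND PROOFS =====
-- "some occurrence of a non-lowercase char with lowered form k" / "… lowercase char …"
def pvAnyU (l : List Char) (k : Char) : Bool :=
  l.any (fun c => !PySem.Chars.islower c && (PySem.Chars.lowerChar c == k))
def pvAnyL (l : List Char) (k : Char) : Bool :=
  l.any (fun c => PySem.Chars.islower c && (PySem.Chars.lowerChar c == k))

theorem pv_create_getD (l : List Char) : ∀ (d : PySem.Dict Char (Bool × Bool)) (k : Char),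
    (l.foldl pvCreate d).getD k (false, false) = d.getD k (false, false) := by
  induction l with
  | nil => intro d k; rfl
  | cons c t ih =>
    intro d k
    rw [List.foldl_cons, ih]
    unfold pvCreate
    by_cases h : d.contains (PySem.Chars.lowerChar c) = true
    · simp [h]
    · simp only [Bool.not_eq_true] at h
      simp only [h, Bool.false_eq_true, if_false]
      rw [PySem.Dict.getD_insert]
      split_ifs with hk
      · subst hk; rw [PySem.Dict.getD_of_not_contains _ _ h]
      · rfl

theorem pv_create_keys (l : List Char) : ∀ (d : PySem.Dict Char (Bool × Bool)),
    (l.foldl pvCreate d).keys = PySem.Set.update d.keys (l.map PySem.Chars.lowerChar) := by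
  induction l with
  | nil => intro d; rfl
  | cons c t ih =>
    intro d
    rw [List.foldl_cons, ih, List.map_cons, PySem.Set.update_cons]
    congr 1
    unfold pvCreate
    by_cases h : d.contains (PySem.Chars.lowerChar c) = true
    · rw [if_pos h, PySem.Set.add_of_mem ((PySem.Dict.contains_iff_mem_keys d _).mp h)]
    · simp only [Bool.not_eq_true] at h
      rw [if_neg (by simp [h]), PySem.Dict.keys_insert_of_not_contains _ _ h,
        PySem.Set.add_of_not_mem (fun hm => by
          simp [(PySem.Dict.contains_iff_mem_keys d _).mpr hm] at h)]

theorem pv_fill_getD (l : List Char) : ∀ (d : PySem.Dict Char (Bool × Bool)) (k : Char),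
    (l.foldl pvFill d).getD k (false, false) =
      ((d.getD k (false, false)).1 || pvAnyU l k, (d.getD k (false, false)).2 || pvAnyL l k) := by
  induction l with
  | nil => intro d k; simp [pvAnyU, pvAnyL]
  | cons c t ih =>
    intro d k
    rw [List.foldl_cons, ih]
    unfold pvFill
    by_cases hl : PySem.Chars.islower c = true
    · simp only [hl, if_true]
      rw [PySem.Dict.getD_modify]
      by_cases hk : k = PySem.Chars.lowerChar c
      · subst hk
        simp [pvAnyU, pvAnyL, hl]
      · have hb : (PySem.Chars.lowerChar c == k) = false := beq_eq_false_iff_ne.mpr (Ne.symm hk)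
        simp [pvAnyU, pvAnyL, hl, hk, hb]
    · simp only [hl, Bool.false_eq_true, if_false]
      rw [PySem.Dict.getD_modify]
      by_cases hk : k = PySem.Chars.lowerChar c
      · subst hk
        simp [pvAnyU, pvAnyL, hl]
      · have hb : (PySem.Chars.lowerChar c == k) = false := beq_eq_false_iff_ne.mpr (Ne.symm hk)
        simp [pvAnyU, pvAnyL, hl, hk, hb]

theorem pv_fill_keys (l : List Char) : ∀ (d : PySem.Dict Char (Bool × Bool)),
    (l.foldl pvFill d).keys = PySem.Set.update d.keys (l.map PySem.Chars.lowerChar) := by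
  induction l with
  | nil => intro d; rfl
  | cons c t ih =>
    intro d
    rw [List.foldl_cons, ih, List.map_cons, PySem.Set.update_cons]
    congr 1
    have step : ∀ (f : Bool × Bool → Bool × Bool),
        (d.modify (PySem.Chars.lowerChar c) (false, false) f).keys
          = PySem.Set.add d.keys (PySem.Chars.lowerChar c) := by
      intro f
      rw [PySem.Dict.keys_modify]
      by_cases h : d.contains (PySem.Chars.lowerChar c) = true
      · rw [PySem.Dict.keys_insert_of_contains _ _ h,
          PySem.Set.add_of_mem ((PySem.Dict.contains_iff_mem_keys d _).mp h)]
      · simp only [Bool.not_eq_true] at h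
        rw [PySem.Dict.keys_insert_of_not_contains _ _ h,
          PySem.Set.add_of_not_mem (fun hm => by
            simp [(PySem.Dict.contains_iff_mem_keys d _).mpr hm] at h)]
    unfold pvFill
    by_cases hl : PySem.Chars.islower c = true
    · simp only [hl, if_true]; exact step _
    · simp only [hl, Bool.false_eq_true, if_false]; exact step _

theorem pv_foldl_count {α : Type} (p : α → Bool) (K : List α) : ∀ (b : Int),
    K.foldl (fun b k => if p k then b + 1 else b) b = b + (K.countP p : Int) := by
  induction K with
  | nil => intro b; simp
  | cons c t ih =>
    intro b
    rw [List.foldl_cons]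
    by_cases h : p c = true
    · simp [h, ih]; ring
    · simp only [Bool.not_eq_true] at h
      simp [h, ih]

-- A's key list and B's set of lowered characters are permutations (both nodup, same members),
-- so the two countP's agree
theorem pv_keys_perm (l : List Char) :
    ((l.foldl pvFill (l.foldl pvCreate PySem.Dict.empty)).keys).Perm
      (PySem.Set.ofList (l.map PySem.Chars.lowerChar)) := by
  have hkeys : (l.foldl pvFill (l.foldl pvCreate PySem.Dict.empty)).keys
      = PySem.Set.update (PySem.Set.update (PySem.Dict.empty : PySem.Dict Char (Bool × Bool)).keys
          (l.map PySem.Chars.lowerChar)) (l.map PySem.Chars.lowerChar) := by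
    rw [pv_fill_keys, pv_create_keys]
  have hend : (PySem.Dict.empty : PySem.Dict Char (Bool × Bool)).keys = ([] : List Char) := rfl
  rw [List.perm_ext_iff_of_nodup
    (by rw [hkeys]; exact PySem.Set.nodup_update _ _ (PySem.Set.nodup_update _ _ PySem.Dict.nodup_keys_empty))
    (PySem.Set.nodup_ofList _)]
  intro k
  rw [hkeys, hend, PySem.Set.mem_update, PySem.Set.mem_update, PySem.Set.mem_ofList]
  simp

theorem pv_balanced (l : List Char) :
    ((l.foldl pvFill (l.foldl pvCreate PySem.Dict.empty)).keys.foldl (fun b k =>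
        if ((l.foldl pvFill (l.foldl pvCreate PySem.Dict.empty)).getD k (false, false)).1 &&
           ((l.foldl pvFill (l.foldl pvCreate PySem.Dict.empty)).getD k (false, false)).2
        then b + 1 else b) 0 : Int)
      = (PySem.Set.ofList (l.map PySem.Chars.lowerChar)).foldl (fun b k =>
          if pvAnyL l k && pvAnyU l k then b + 1 else b) 0 := by
  rw [pv_foldl_count, pv_foldl_count]
  have hfun : (fun k => ((l.foldl pvFill (l.foldl pvCreate PySem.Dict.empty)).getD k (false, false)).1 &&
        ((l.foldl pvFill (l.foldl pvCreate PySem.Dict.empty)).getD k (false, false)).2)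
      = fun k => pvAnyL l k && pvAnyU l k := by
    funext k
    rw [pv_fill_getD, pv_create_getD]
    simp [Bool.and_comm]
  rw [hfun, (pv_keys_perm l).countP_eq]

-- ===== VERDICT (by name: the statement is the Claim_ definition above) =====
theorem solution_spec : Claim_equal_solution := by
  intro S _
  simp only [Spec_solution, solution, solution_alt]
  rw [pv_balanced]
  rfl
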